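-- pv_equiv track=rewrite | github.com/cirosantilli/project-euler-solvers | solvers/38.py | concatenated_product
-- ===== SOURCE A (Python) =====
-- from typing import Optional, Tuple
--
-- def concatenated_product(x: int) -> Tuple[str, int]:
--     """
--     Returns (concatenated_string, n) for the smallest n such that the concatenation
--     of x*1, x*2, ... x*n has length >= 9.
--     """
--     parts = []
--     n = 0
--     total_len = 0
--     while total_len < 9:
--         n += 1
--         s = str(x * n)
--         parts.append(s)
--         total_len += len(s)
--     return "".join(parts), n
-- ===== SOURCE B (Python) =====
-- def concatenated_product(x: int):
--     # Recursive descent on the remaining needed length: go(i, need) returns the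
--     # concatenation of str(x*i), str(x*(i+1)), ... (built back-to-front on
--     # return) together with the last index used, stopping as soon as str(x*i)
--     # alone covers what is still needed. No accumulator list, no running total.
--     def go(i, need):
--         s = str(x * i)
--         if len(s) >= need:
--             return s, i
--         rest, n = go(i + 1, need - len(s))
--         return s + rest, n
--     return go(1, 9)
-- ===== Notes on version B (the rewrite author's own statement) =====
-- stated objective: alternative
-- what changed: B replaces A's iterative accumulate-and-append loop (parts list + running total) with a recursion on the remaining needed length that builds the string back-to-front on return, keeping no list and no running total.
import Mathlib
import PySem

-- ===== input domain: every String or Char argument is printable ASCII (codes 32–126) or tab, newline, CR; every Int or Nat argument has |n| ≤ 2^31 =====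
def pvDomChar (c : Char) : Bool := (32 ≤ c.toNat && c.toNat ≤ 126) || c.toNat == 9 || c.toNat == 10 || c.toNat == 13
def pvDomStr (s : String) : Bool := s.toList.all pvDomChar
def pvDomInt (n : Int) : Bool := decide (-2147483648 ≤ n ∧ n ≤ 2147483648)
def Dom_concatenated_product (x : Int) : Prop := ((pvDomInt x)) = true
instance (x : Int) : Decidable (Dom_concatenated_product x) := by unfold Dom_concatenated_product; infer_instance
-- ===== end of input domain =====

-- B replaces A's accumulate-and-append loop by a recursion on the remaining
-- needed length that builds the string back-to-front on return (alternative).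

-- str(m) is never empty (used by both ports' termination proofs)
theorem pv_len_toChars_pos (m : Int) : 1 ≤ (PySem.Int.toChars m).length := by
  unfold PySem.Int.toChars; split
  · simp
  · exact Nat.length_toDigits_pos

-- ===== PORT A =====
def pvLoopA (x : Int) (parts : List String) (n : Int) (total : Int) : List String × Int :=
  if total < 9 then
    let s := PySem.Int.toStr (x * (n + 1))
    pvLoopA x (parts ++ [s]) (n + 1) (total + PySem.Str.len s)
  else (parts, n)
termination_by (9 - total).toNat
decreasing_by
  have h := pv_len_toChars_pos (x * (n + 1))
  have h2 : PySem.Str.len (PySem.Int.toStr (x * (n + 1))) = (PySem.Int.toChars (x * (n + 1))).length := by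
    simp [PySem.Str.len, PySem.Int.toList_toStr]
  omega

def concatenated_product (x : Int) : String × Int :=
  let r := pvLoopA x [] 0 0
  (PySem.Str.join "" r.1, r.2)

-- ===== PORT B =====
-- go from Source B, exact on List Char (PySem.Str is the same wrapper); one final
-- String.ofList converts the built character list to the returned string.
def pvGoB (x : Int) (i : Int) (need : Int) : List Char × Int :=
  let s := PySem.Int.toChars (x * i)
  if need ≤ (s.length : Int) then (s, i)
  else
    let r := pvGoB x (i + 1) (need - s.length)
    (s ++ r.1, r.2)
termination_by need.toNat
decreasing_by
  have := pv_len_toChars_pos (x * i)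
  omega

def concatenated_product_alt (x : Int) : String × Int :=
  let r := pvGoB x 1 9
  (String.ofList r.1, r.2)

-- ===== PRECONDITION & SPEC =====
def Spec_concatenated_product (x : Int) (out : String × Int) : Prop := out = concatenated_product_alt x
instance (x : Int) (out : String × Int) : Decidable (Spec_concatenated_product x out) := by unfold Spec_concatenated_product; infer_instance

-- ===== CLAIM (what is proved, stated in full; the proofs are below) =====
def Claim_equal_concatenated_product : Prop := ∀ (x : Int), Dom_concatenated_product x → Spec_concatenated_product x (concatenated_product x)

-- ===== LEMMAS AND PROOFS =====

-- proof-only counter: the n both programs stop at, from state (n, total)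
def pvCount (x : Int) (n : Int) (total : Int) : Int :=
  if total < 9 then
    pvCount x (n + 1) (total + (PySem.Int.toChars (x * (n + 1))).length)
  else n
termination_by (9 - total).toNat
decreasing_by
  have := pv_len_toChars_pos (x * (n + 1))
  omega

theorem pvCount_ge (x n total : Int) : n ≤ pvCount x n total := by
  induction n, total using pvCount.induct x with
  | case1 n total h ih => rw [pvCount]; simp only [if_pos h]; omega
  | case2 n total h => rw [pvCount]; simp only [if_neg h]; omega

theorem pv_strlen_eq (m : Int) :
    (PySem.Str.len (PySem.Int.toStr m) : Int) = ((PySem.Int.toChars m).length : Int) := by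
  simp [PySem.Str.len, PySem.Int.toList_toStr]

theorem pvLoopA_eq (x n total : Int) (parts : List String) :
    pvLoopA x parts n total =
      (parts ++ ((PySem.List.pyRange (n + 1) (pvCount x n total + 1) 1).map
          (fun i => PySem.Int.toStr (x * i))),
       pvCount x n total) := by
  induction n, total using pvCount.induct x generalizing parts with
  | case1 n total h ih =>
    rw [pvLoopA, pvCount]
    simp only [if_pos h]
    rw [show total + PySem.Str.len (PySem.Int.toStr (x * (n + 1))) =
        total + (PySem.Int.toChars (x * (n + 1))).length by
      have := pv_strlen_eq (x * (n + 1)); omega]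
    rw [ih]
    have hge : n + 1 ≤ pvCount x (n + 1) (total + (PySem.Int.toChars (x * (n + 1))).length) :=
      pvCount_ge _ _ _
    rw [PySem.List.pyRange_one_cons (a := n + 1) (by omega)]
    simp
  | case2 n total h =>
    rw [pvLoopA, pvCount]
    simp only [if_neg h]
    rw [PySem.List.pyRange_one_eq_nil (by omega)]
    simp

theorem pvGoB_eq (x n total : Int) (h : total < 9) :
    pvGoB x (n + 1) (9 - total) =
      (((PySem.List.pyRange (n + 1) (pvCount x n total + 1) 1).map
          (fun i => PySem.Int.toChars (x * i))).flatten,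
       pvCount x n total) := by
  induction n, total using pvCount.induct x with
  | case1 n total h0 ih =>
    rw [pvGoB, pvCount]
    simp only [if_pos h0]
    set s := PySem.Int.toChars (x * (n + 1)) with hs
    by_cases hc : (9 : Int) - total ≤ (s.length : Int)
    · -- stop here: pvCount of the next state is n+1
      rw [if_pos hc]
      have hstop : pvCount x (n + 1) (total + s.length) = n + 1 := by
        rw [pvCount]; simp only [if_neg (by omega : ¬ total + (s.length:Int) < 9)]
      rw [hstop]
      rw [PySem.List.pyRange_one_cons (a := n + 1) (by omega)]
      rw [PySem.List.pyRange_one_eq_nil (by omega)]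
      simp
      exact hs
    · rw [if_neg hc]
      have h2 : total + (s.length : Int) < 9 := by omega
      have := ih h2
      rw [show (9 : Int) - total - s.length = 9 - (total + s.length) by ring, this]
      have hge : n + 2 ≤ pvCount x (n + 1) (total + s.length) + 1 := by
        have := pvCount_ge x (n + 1) (total + s.length); omega
      rw [PySem.List.pyRange_one_cons (a := n + 1)
        (by have := pvCount_ge x (n + 1) (total + (s.length:Int)); omega)]
      simp
      exact hs
  | case2 n total h0 => omega

-- join with empty separator is flatten, as a String.ofList
theorem pv_join_empty (l : List (List Char)) :
    PySem.Str.join "" (l.map String.ofList) = String.ofList l.flatten := by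
  have h : (PySem.Str.join "" (l.map String.ofList)).toList = l.flatten := by
    rw [PySem.Str.toList_join]
    have h1 : (l.map String.ofList).map String.toList = l := by
      rw [List.map_map]
      have : String.toList ∘ String.ofList = id := by
        funext cs; simp
      rw [this, List.map_id]
    rw [show ("" : String).toList = [] from rfl, h1]
    induction l with
    | nil => rfl
    | cons a l ih =>
      cases l with
      | nil => simp [PySem.Chars.join, List.intercalate]
      | cons b l => rw [PySem.Chars.join_cons_cons] at *; simp_all
  calc PySem.Str.join "" (l.map String.ofList)
      = String.ofList (PySem.Str.join "" (l.map String.ofList)).toList := by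
        rw [String.ofList_toList]
    _ = String.ofList l.flatten := by rw [h]

-- ===== VERDICT (by name: the statement is the Claim_ definition above) =====
theorem concatenated_product_spec : Claim_equal_concatenated_product := by
  intro x _
  unfold Spec_concatenated_product concatenated_product concatenated_product_alt
  rw [pvLoopA_eq]
  have hB := pvGoB_eq x 0 0 (by norm_num)
  norm_num at hB
  simp only [hB, List.nil_append, zero_add]
  have h2 : ((PySem.List.pyRange 1 (pvCount x 0 0 + 1) 1).map
      (fun i => PySem.Int.toStr (x * i))) =
      ((PySem.List.pyRange 1 (pvCount x 0 0 + 1) 1).map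
      (fun i => PySem.Int.toChars (x * i))).map String.ofList := by
    simp only [List.map_map]
    apply List.map_congr_left
    intro i _
    simp [PySem.Int.toStr, PySem.Int.toChars]
  rw [h2, pv_join_empty]
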